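-- pv_equiv track=rewrite | github.com/SpasiboZa9let/school_scheduler | utils/helpers.py | calculate_teacher_gaps
-- ===== SOURCE A (Python) =====
-- from typing import Dict, List, Tuple
--
-- def calculate_teacher_gaps(schedule: dict, periods: List[str], days_of_week: List[str]) -> Dict[str, int]:
--     teacher_gaps: Dict[str, int] = {}
--     for day in days_of_week:
--         day_sched = schedule.get(day, {})
--         per_indices: Dict[str, List[int]] = {}
--         for period, lesson in day_sched.items():
--             teacher = lesson.get("teacher", "")
--             if teacher:
--                 per_indices.setdefault(teacher, []).append(periods.index(period))
--         for t, idx_list in per_indices.items():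
--             idx_list.sort()
--             gaps = sum(idx_list[i] - idx_list[i - 1] - 1 for i in range(1, len(idx_list)))
--             teacher_gaps[t] = teacher_gaps.get(t, 0) + gaps
--     return teacher_gaps
-- ===== SOURCE B (Python) =====
-- from typing import Dict, List, Tuple
--
-- def calculate_teacher_gaps(schedule: dict, periods: List[str], days_of_week: List[str]) -> Dict[str, int]:
--     # first-occurrence index of each period, built once: no repeated periods.index scans
--     pidx: Dict[str, int] = {}
--     for i, p in enumerate(periods):
--         if p not in pidx:
--             pidx[p] = i
--     totals: Dict[str, int] = {}
--     for day in days_of_week: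
--         # per teacher keep only (min index, max index, count) -- no lists, no sorting
--         stats: Dict[str, Tuple[int, int, int]] = {}
--         for period, lesson in schedule.get(day, {}).items():
--             teacher = lesson.get("teacher", "")
--             if teacher:
--                 i = pidx[period]
--                 prev = stats.get(teacher)
--                 if prev is None:
--                     stats[teacher] = (i, i, 1)
--                 else:
--                     mn, mx, c = prev
--                     stats[teacher] = (min(mn, i), max(mx, i), c + 1)
--         for t, (mn, mx, c) in stats.items():
--             totals[t] = totals.get(t, 0) + (mx - mn - (c - 1))
--     return totals
-- ===== Notes on version B (the rewrite author's own statement) =====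
-- stated objective: alternative
-- what changed: B precomputes a first-occurrence period-to-index dict once instead of calling periods.index per lesson, and replaces each teacher's index list + sort + telescoping sum by a running (min, max, count) triple, computing the day's gap as max - min - (count - 1); on the generated inputs this was not measurably faster.
import Mathlib
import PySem

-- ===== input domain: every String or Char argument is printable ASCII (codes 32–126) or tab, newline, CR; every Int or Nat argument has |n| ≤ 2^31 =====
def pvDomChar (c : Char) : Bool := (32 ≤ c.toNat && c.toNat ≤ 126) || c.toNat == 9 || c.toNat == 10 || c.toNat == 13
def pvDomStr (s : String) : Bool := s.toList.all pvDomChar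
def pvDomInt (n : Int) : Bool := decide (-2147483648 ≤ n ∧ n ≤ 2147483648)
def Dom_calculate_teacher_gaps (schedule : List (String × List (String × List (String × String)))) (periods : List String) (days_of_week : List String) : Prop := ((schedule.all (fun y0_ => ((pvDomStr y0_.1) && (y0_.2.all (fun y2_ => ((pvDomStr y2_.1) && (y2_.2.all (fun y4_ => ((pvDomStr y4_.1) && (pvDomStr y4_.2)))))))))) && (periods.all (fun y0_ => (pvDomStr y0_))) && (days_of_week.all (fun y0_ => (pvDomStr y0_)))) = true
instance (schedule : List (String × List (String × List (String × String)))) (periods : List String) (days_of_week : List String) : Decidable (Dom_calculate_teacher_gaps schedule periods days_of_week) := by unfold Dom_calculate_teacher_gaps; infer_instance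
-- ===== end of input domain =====

-- B replaces the per-lesson periods.index scan by one precomputed period→index dict and the
-- per-teacher sort+telescoping sum by a running (min, max, count) triple (objective: alternative).

-- ===== PORT A =====
-- per_indices building step: one (period, lesson) item of the day's schedule
def pvAperStep (periods : List String) (pi : PySem.Dict String (List Int)) (pl : String × List (String × String)) : PySem.Dict String (List Int) :=
  let teacher := (PySem.Dict.mk pl.2).getD "teacher" ""
  if teacher ≠ "" then
    -- periods.index(period): Python raises ValueError when the period is absent (excluded by Pre_)
    pi.insert teacher (pi.getD teacher [] ++ [(((PySem.List.index? periods pl.1).getD 0 : Nat) : Int)])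
  else pi

-- the 'for t, idx_list in per_indices.items()' body: sort, telescoping gap sum, accumulate
def pvAgapStep (tg : PySem.Dict String Int) (q : String × List Int) : PySem.Dict String Int :=
  let idx_list := PySem.List.sorted q.2 (fun x => x) false
  let gaps := (PySem.List.pyRange 1 (PySem.List.len idx_list) 1).foldl
      (fun s i => s + (PySem.List.pyGetD idx_list i 0 - PySem.List.pyGetD idx_list (i - 1) 0 - 1)) 0
  tg.insert q.1 (tg.getD q.1 0 + gaps)

-- one day of A's outer loop
def pvAdayStep (schedule : List (String × List (String × List (String × String)))) (periods : List String) (tg : PySem.Dict String Int) (day : String) : PySem.Dict String Int :=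
  let day_sched := (PySem.Dict.mk schedule).getD day []
  let per_indices := day_sched.foldl (pvAperStep periods) (PySem.Dict.mk [])
  per_indices.items.foldl pvAgapStep tg

def calculate_teacher_gaps (schedule : List (String × List (String × List (String × String)))) (periods : List String) (days_of_week : List String) : List (String × Int) :=
  (days_of_week.foldl (pvAdayStep schedule periods) (PySem.Dict.mk [])).items

-- ===== PORT B =====
-- pidx building: first-occurrence index of each period
def pvPidxStep (d : PySem.Dict String Int) (ip : Int × String) : PySem.Dict String Int :=
  if d.contains ip.2 then d else d.insert ip.2 ip.1

def pvPidx (periods : List String) : PySem.Dict String Int :=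
  (PySem.List.enumerate periods).foldl pvPidxStep (PySem.Dict.mk [])

-- stats building step: one (period, lesson) item, keeping (min, max, count) per teacher
def pvBstatStep (pidx : PySem.Dict String Int) (st : PySem.Dict String (Int × Int × Int)) (pl : String × List (String × String)) : PySem.Dict String (Int × Int × Int) :=
  let teacher := (PySem.Dict.mk pl.2).getD "teacher" ""
  if teacher ≠ "" then
    -- pidx[period]: Python raises KeyError when the period is absent (excluded by Pre_)
    let i := pidx.getD pl.1 0
    match st.get? teacher with
    | none => st.insert teacher (i, i, 1)
    | some (mn, mx, c) => st.insert teacher (min mn i, max mx i, c + 1)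
  else st

-- the 'for t, (mn, mx, c) in stats.items()' body
def pvBtotStep (tot : PySem.Dict String Int) (q : String × (Int × Int × Int)) : PySem.Dict String Int :=
  tot.insert q.1 (tot.getD q.1 0 + (q.2.2.1 - q.2.1 - (q.2.2.2 - 1)))

-- one day of B's outer loop
def pvBdayStep (schedule : List (String × List (String × List (String × String)))) (pidx : PySem.Dict String Int) (tot : PySem.Dict String Int) (day : String) : PySem.Dict String Int :=
  let stats := ((PySem.Dict.mk schedule).getD day []).foldl (pvBstatStep pidx) (PySem.Dict.mk [])
  stats.items.foldl pvBtotStep tot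

def calculate_teacher_gaps_alt (schedule : List (String × List (String × List (String × String)))) (periods : List String) (days_of_week : List String) : List (String × Int) :=
  let pidx := pvPidx periods
  (days_of_week.foldl (pvBdayStep schedule pidx) (PySem.Dict.mk [])).items

-- ===== PRECONDITION & SPEC =====
-- Pre_ excludes exactly the inputs where a scheduled lesson with a non-empty teacher names a
-- period not in `periods`: there Python A raises ValueError (and Python B raises KeyError).
def Pre_calculate_teacher_gaps (schedule : List (String × List (String × List (String × String)))) (periods : List String) (days_of_week : List String) : Prop :=
  ∀ day ∈ days_of_week, ∀ pl ∈ (PySem.Dict.mk schedule).getD day ([] : List (String × List (String × String))),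
    (PySem.Dict.mk pl.2).getD "teacher" "" ≠ "" → pl.1 ∈ periods
instance (schedule : List (String × List (String × List (String × String)))) (periods : List String) (days_of_week : List String) : Decidable (Pre_calculate_teacher_gaps schedule periods days_of_week) := by unfold Pre_calculate_teacher_gaps; infer_instance

def pvWitness_calculate_teacher_gaps : (List (String × List (String × List (String × String)))) × List String × List String :=
  ([("Mon", [("p1", [("teacher", "T")]), ("p3", [("teacher", "T")])])], ["p1", "p2", "p3"], ["Mon"])

def Spec_calculate_teacher_gaps (schedule : List (String × List (String × List (String × String)))) (periods : List String) (days_of_week : List String) (out : List (String × Int)) : Prop := out = calculate_teacher_gaps_alt schedule periods days_of_week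
instance (schedule : List (String × List (String × List (String × String)))) (periods : List String) (days_of_week : List String) (out : List (String × Int)) : Decidable (Spec_calculate_teacher_gaps schedule periods days_of_week out) := by unfold Spec_calculate_teacher_gaps; infer_instance

-- ===== CLAIM (what is proved, stated in full; the proofs are below) =====
def Claim_equal_calculate_teacher_gaps : Prop := ∀ (schedule : List (String × List (String × List (String × String)))) (periods : List String) (days_of_week : List String), Dom_calculate_teacher_gaps schedule periods days_of_week → Pre_calculate_teacher_gaps schedule periods days_of_week → Spec_calculate_teacher_gaps schedule periods days_of_week (calculate_teacher_gaps schedule periods days_of_week)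

-- ===== LEMMAS AND PROOFS =====

-- (min, max, count) summary of a nonempty index list ((0,0,0) is a dummy for [])
def pvSumm : List Int → Int × Int × Int
  | [] => (0, 0, 0)
  | a :: t => (t.foldl min a, t.foldl max a, (t.length : Int) + 1)

-- map pvSumm over the values of a dict
def pvMapV (d : PySem.Dict String (List Int)) : PySem.Dict String (Int × Int × Int) :=
  PySem.Dict.mk (d.items.map (fun q => (q.1, pvSumm q.2)))

theorem pvSumm_append (a : Int) (t : List Int) (i : Int) :
    pvSumm ((a :: t) ++ [i]) =
      (min (pvSumm (a :: t)).1 i, max (pvSumm (a :: t)).2.1 i, (pvSumm (a :: t)).2.2 + 1) := by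
  simp [pvSumm, List.foldl_append]

theorem pvMapV_contains (d : PySem.Dict String (List Int)) (k : String) :
    (pvMapV d).contains k = d.contains k := by
  simp only [pvMapV, PySem.Dict.contains, List.any_map]
  rfl

theorem pvMapV_get? (d : PySem.Dict String (List Int)) (k : String) :
    (pvMapV d).get? k = (d.get? k).map pvSumm := by
  simp only [pvMapV, PySem.Dict.get?, List.find?_map, Option.map_map]
  rfl

theorem pvMapV_insert (d : PySem.Dict String (List Int)) (k : String) (L : List Int) :
    pvMapV (d.insert k L) = (pvMapV d).insert k (pvSumm L) := by
  apply PySem.Dict.ext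
  show (d.insert k L).items.map (fun q => (q.1, pvSumm q.2)) = ((pvMapV d).insert k (pvSumm L)).items
  rw [PySem.Dict.items_insert, PySem.Dict.items_insert, pvMapV_contains]
  by_cases h : d.contains k = true
  · simp only [h, if_pos, pvMapV, List.map_map]
    apply List.map_congr_left
    intro p _
    by_cases hp : (p.1 == k) = true <;> simp [Function.comp, hp]
  · simp [h, pvMapV]

theorem pvPidx_get (l : List String) (p : String) : ∀ (s : Int) (d : PySem.Dict String Int),
    ((PySem.List.enumerate l s).foldl pvPidxStep d).get? p
      = (d.get? p).or ((PySem.List.index? l p).map (fun n => s + (n : Int))) := by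
  induction l with
  | nil => intro s d; simp [PySem.List.enumerate, PySem.List.index?]
  | cons x t ih =>
    intro s d
    rw [PySem.List.enumerate_cons]
    simp only [List.foldl_cons]
    rw [ih]
    by_cases hpx : x = p
    · subst hpx
      rw [PySem.List.index?_cons_self]
      by_cases h : d.contains x = true
      · have hs : (d.get? x).isSome := by rw [← PySem.Dict.contains_eq_isSome_get?]; exact h
        simp only [pvPidxStep, h, if_pos]
        obtain ⟨v, hv⟩ := Option.isSome_iff_exists.mp hs
        simp [hv]
      · have hn : d.get? x = none := (PySem.Dict.get?_eq_none_iff_contains d x).mpr (by simpa using h)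
        simp only [pvPidxStep, h]
        simp [hn, PySem.Dict.get?_insert_self]
    · rw [PySem.List.index?_cons_of_ne t hpx]
      have hd : (pvPidxStep d (s, x)).get? p = d.get? p := by
        by_cases h : d.contains x = true
        · simp [pvPidxStep, h]
        · simp only [pvPidxStep, h]
          exact PySem.Dict.get?_insert_of_ne d s (fun hh => hpx hh.symm)
      rw [hd]
      cases PySem.List.index? t p <;> (simp; try ring_nf)

theorem pvPidx_getD (periods : List String) (p : String) :
    (pvPidx periods).getD p 0 = (((PySem.List.index? periods p).getD 0 : Nat) : Int) := by
  rw [PySem.Dict.getD_eq_get?_getD, pvPidx, pvPidx_get]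
  have : (PySem.Dict.mk ([] : List (String × Int))).get? p = none := by
    simp [PySem.Dict.get?]
  rw [this]
  cases PySem.List.index? periods p <;> simp

theorem pvStats_eq (periods : List String) (ds : List (String × List (String × String))) :
    ∀ (pi : PySem.Dict String (List Int)), (∀ q ∈ pi.items, q.2 ≠ []) →
      ds.foldl (pvBstatStep (pvPidx periods)) (pvMapV pi) = pvMapV (ds.foldl (pvAperStep periods) pi)
      ∧ ∀ q ∈ (ds.foldl (pvAperStep periods) pi).items, q.2 ≠ [] := by
  induction ds with
  | nil => intro pi hpi; exact ⟨rfl, hpi⟩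
  | cons pl ds ih =>
    intro pi hpi
    simp only [List.foldl_cons]
    by_cases hT : (PySem.Dict.mk pl.2).getD "teacher" "" ≠ ""
    · set T := (PySem.Dict.mk pl.2).getD "teacher" "" with hTdef
      have hstep : pvBstatStep (pvPidx periods) (pvMapV pi) pl = pvMapV (pvAperStep periods pi pl) := by
        simp only [pvBstatStep, pvAperStep, ← hTdef, if_pos hT, pvPidx_getD, pvMapV_get?]
        cases hget : pi.get? T with
        | none =>
          have hgetD : pi.getD T [] = [] := by
            rw [PySem.Dict.getD_eq_get?_getD, hget]; rfl
          rw [hgetD]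
          simp only [Option.map_none]
          rw [pvMapV_insert]
          rfl
        | some L =>
          obtain ⟨aa, tl, rfl⟩ : ∃ aa tl, L = aa :: tl := by
            have hmem := PySem.Dict.mem_items_of_get?_eq_some pi hget
            have := hpi _ hmem
            cases L with
            | nil => simp at this
            | cons aa tl => exact ⟨aa, tl, rfl⟩
          have hgetD : pi.getD T [] = aa :: tl := by
            rw [PySem.Dict.getD_eq_get?_getD, hget]; rfl
          rw [hgetD]
          simp only [Option.map_some]
          rw [pvMapV_insert, pvSumm_append]
      have hpi' : ∀ q ∈ (pvAperStep periods pi pl).items, q.2 ≠ [] := by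
        intro q hq
        simp only [pvAperStep, ← hTdef, if_pos hT] at hq
        rcases (PySem.Dict.mem_items_insert _ _ _ _).mp hq with rfl | ⟨hmem, _⟩
        · simp
        · exact hpi _ hmem
      rw [hstep]
      exact ih (pvAperStep periods pi pl) hpi'
    · have hA : pvAperStep periods pi pl = pi := by
        simp only [pvAperStep, if_neg hT]
      have hB : pvBstatStep (pvPidx periods) (pvMapV pi) pl = pvMapV pi := by
        simp only [pvBstatStep, if_neg hT]
      rw [hA, hB]
      exact ih pi hpi

-- xs[i] on an appended list, in-range index
theorem pvGet_append (l : List Int) (x : Int) (i : Int) (h0 : 0 ≤ i) (h1 : i < l.length) :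
    PySem.List.pyGetD (l ++ [x]) i 0 = PySem.List.pyGetD l i 0 := by
  rw [PySem.List.pyGetD_eq_getElem (l ++ [x]) 0 h0 (by simp; omega),
      PySem.List.pyGetD_eq_getElem l 0 h0 h1]
  exact List.getElem_append_left (by omega)

-- the telescoping gap sum of a nonempty list, cons form
theorem pvTele (a : Int) (t : List Int) :
    (PySem.List.pyRange 1 (PySem.List.len (a :: t)) 1).foldl
        (fun s i => s + (PySem.List.pyGetD (a :: t) i 0 - PySem.List.pyGetD (a :: t) (i - 1) 0 - 1)) 0
      = (a :: t).getLast (by simp) - a - t.length := by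
  induction t using List.reverseRecOn with
  | nil =>
    rw [PySem.List.len_eq]
    norm_num [PySem.List.pyRange_one_eq_nil]
  | append_singleton t' x ih =>
    show (PySem.List.pyRange 1 (PySem.List.len ((a :: t') ++ [x])) 1).foldl
        (fun s i => s + (PySem.List.pyGetD ((a :: t') ++ [x]) i 0 - PySem.List.pyGetD ((a :: t') ++ [x]) (i - 1) 0 - 1)) 0
      = ((a :: t') ++ [x]).getLast (by simp) - a - ((t' ++ [x]).length : Int)
    have hlen : PySem.List.len ((a :: t') ++ [x]) = (↑t'.length + 1) + 1 := by
      simp [PySem.List.len_eq]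
    rw [hlen, PySem.List.pyRange_one_succ_right (by omega), List.foldl_append]
    have hcong :
        (PySem.List.pyRange 1 (↑t'.length + 1) 1).foldl
          (fun s i => s + (PySem.List.pyGetD ((a :: t') ++ [x]) i 0 - PySem.List.pyGetD ((a :: t') ++ [x]) (i - 1) 0 - 1)) 0
        = (PySem.List.pyRange 1 (↑t'.length + 1) 1).foldl
          (fun s i => s + (PySem.List.pyGetD (a :: t') i 0 - PySem.List.pyGetD (a :: t') (i - 1) 0 - 1)) 0 := by
      apply PySem.List.foldl_congr_mem
      intro acc i hi
      have hi' := PySem.List.mem_pyRange_one.mp hi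
      rw [pvGet_append (a :: t') x i (by omega) (by simp; try omega),
          pvGet_append (a :: t') x (i - 1) (by omega) (by simp; try omega)]
    have hlen2 : PySem.List.len (a :: t') = (↑t'.length + 1 : Int) := by
      rw [PySem.List.len_eq]; simp
    rw [hlen2] at ih
    rw [hcong, ih]
    simp only [List.foldl_cons, List.foldl_nil]
    have hx : PySem.List.pyGetD ((a :: t') ++ [x]) (↑t'.length + 1) 0 = x := by
      rw [PySem.List.pyGetD_eq_getElem _ 0 (by omega) (by simp; try omega)]
      exact List.getElem_concat_length (by simp) _
    have hlast : PySem.List.pyGetD ((a :: t') ++ [x]) ((↑t'.length + 1) - 1) 0 = (a :: t').getLast (by simp) := by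
      rw [PySem.List.pyGetD_eq_getElem _ 0 (by omega) (by simp; try omega)]
      rw [List.getLast_eq_getElem]
      rw [List.getElem_append_left (by simp)]
      congr 1
      simp
    rw [hx, hlast, List.getLast_concat]
    simp only [List.length_append, List.length_cons, List.length_nil]
    push_cast
    ring

theorem pvTele' (l : List Int) (hne : l ≠ []) :
    (PySem.List.pyRange 1 (PySem.List.len l) 1).foldl
        (fun s i => s + (PySem.List.pyGetD l i 0 - PySem.List.pyGetD l (i - 1) 0 - 1)) 0
      = l.getLast hne - l.head hne - ((l.length : Int) - 1) := by
  cases l with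
  | nil => exact absurd rfl hne
  | cons a t =>
    rw [pvTele a t]
    simp only [List.head_cons, List.length_cons]
    push_cast
    ring

theorem pvPairwise_le_getLast (l : List Int) (h : l.Pairwise (· ≤ ·)) (hne : l ≠ []) :
    ∀ y ∈ l, y ≤ l.getLast hne := by
  induction l with
  | nil => simp at hne
  | cons x t ih =>
    intro y hy
    cases t with
    | nil => simp at hy; simp [hy]
    | cons b u =>
      rw [List.getLast_cons (by simp)]
      rcases List.mem_cons.mp hy with rfl | hmem
      · exact le_trans (List.rel_of_pairwise_cons h (List.getLast_mem (by simp))) (le_refl _)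
      · exact ih (List.Pairwise.of_cons h) (by simp) y hmem

-- head and last of sorted(L) are min and max of L
theorem pvSorted_head_last (a : Int) (t : List Int) (hne : PySem.List.sorted (a :: t) (fun x => x) false ≠ []) :
    (PySem.List.sorted (a :: t) (fun x => x) false).head hne = t.foldl min a ∧
    (PySem.List.sorted (a :: t) (fun x => x) false).getLast hne = t.foldl max a := by
  have hminmem : t.foldl min a ∈ (a :: t) := PySem.List.min?_mem (PySem.List.min?_id_cons a t)
  have hminle : ∀ y ∈ (a :: t), t.foldl min a ≤ y := PySem.List.min?_isMin (PySem.List.min?_id_cons a t)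
  have hmaxmem : t.foldl max a ∈ (a :: t) := PySem.List.max?_mem (PySem.List.max?_id_cons a t)
  have hmaxge : ∀ y ∈ (a :: t), y ≤ t.foldl max a := PySem.List.max?_isMax (PySem.List.max?_id_cons a t)
  have hp : (PySem.List.sorted (a :: t) (fun x => x) false).Pairwise (· ≤ ·) :=
    PySem.List.sorted_pairwise (a :: t) (fun x => x)
  constructor
  · obtain ⟨m, ts, hc⟩ := List.exists_cons_of_ne_nil hne
    have h1 : ∀ y ∈ (a :: t), m ≤ y := PySem.List.key_head_sorted_le (a :: t) (fun x => x) hc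
    have hmmem : m ∈ (a :: t) := (PySem.List.mem_sorted _ _ _ _).mp (hc ▸ List.mem_cons_self)
    have : m = t.foldl min a := le_antisymm (h1 _ hminmem) (hminle _ hmmem)
    rw [← this]
    simp [hc]
  · have hlast_in : (PySem.List.sorted (a :: t) (fun x => x) false).getLast hne ∈ (a :: t) :=
      (PySem.List.mem_sorted _ _ _ _).mp (List.getLast_mem hne)
    exact le_antisymm (hmaxge _ hlast_in)
      (pvPairwise_le_getLast _ hp hne _ ((PySem.List.mem_sorted _ _ _ _).mpr hmaxmem))

theorem pvGap_eq (tg : PySem.Dict String Int) (q : String × List Int) (h : q.2 ≠ []) :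
    pvAgapStep tg q = pvBtotStep tg (q.1, pvSumm q.2) := by
  obtain ⟨name, L⟩ := q
  obtain ⟨a, t, rfl⟩ : ∃ a t, L = a :: t := by
    cases L with
    | nil => simp at h
    | cons a t => exact ⟨a, t, rfl⟩
  have hne : PySem.List.sorted (a :: t) (fun x => x) false ≠ [] := by
    rw [Ne, PySem.List.sorted_eq_nil_iff]; simp
  simp only [pvAgapStep, pvBtotStep]
  congr 2
  rw [pvTele' _ hne, (pvSorted_head_last a t hne).1, (pvSorted_head_last a t hne).2,
      PySem.List.length_sorted]
  simp only [pvSumm, List.length_cons]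
  push_cast
  ring

theorem pvItems_fold (pi : PySem.Dict String (List Int)) (h : ∀ q ∈ pi.items, q.2 ≠ []) (tg : PySem.Dict String Int) :
    (pvMapV pi).items.foldl pvBtotStep tg = pi.items.foldl pvAgapStep tg := by
  show (pi.items.map (fun q => (q.1, pvSumm q.2))).foldl pvBtotStep tg = pi.items.foldl pvAgapStep tg
  rw [List.foldl_map]
  exact PySem.List.foldl_congr_mem _ _ _ _ (fun acc q hq => (pvGap_eq acc q (h q hq)).symm)

theorem pvDay_eq (schedule : List (String × List (String × List (String × String)))) (periods : List String) (tg : PySem.Dict String Int) (day : String) :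
    pvBdayStep schedule (pvPidx periods) tg day = pvAdayStep schedule periods tg day := by
  simp only [pvBdayStep, pvAdayStep]
  have e : pvMapV (PySem.Dict.mk []) = (PySem.Dict.mk [] : PySem.Dict String (Int × Int × Int)) := rfl
  rw [← e]
  obtain ⟨h1, h2⟩ := pvStats_eq periods ((PySem.Dict.mk schedule).getD day []) (PySem.Dict.mk [])
    (by intro q hq; simp at hq)
  rw [h1]
  exact pvItems_fold _ h2 tg

-- ===== VERDICT (by name: the statement is the Claim_ definition above) =====
theorem calculate_teacher_gaps_spec : Claim_equal_calculate_teacher_gaps := by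
  intro schedule periods days_of_week _ _
  unfold Spec_calculate_teacher_gaps calculate_teacher_gaps calculate_teacher_gaps_alt
  congr 1
  exact PySem.List.foldl_congr_mem _ _ _ _ (fun acc day _ => (pvDay_eq schedule periods acc day).symm)
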